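-- pv_equiv track=rewrite | github.com/daniel-reich/ubiquitous-fiesta | vfJujzoYBtgLC8frK_15.py | word_to_decimal
-- ===== SOURCE A (Python) =====
-- def word_to_decimal(word):
--   l = list(word)
--   for i in range(len(l)):
--     l[i] = l[i].lower()
--   a = 0
--   for i in range(len(l)):
--     if ord(l[i]) > a:
--       a = ord(l[i])
--   b = 10 + a - 96
--   myans = 0
--   for i in range(len(l)):
--     myans += (ord(l[i])-97+10)*b**((len(l))-i-1)
--   return myans
-- ===== SOURCE B (Python) =====
-- def word_to_decimal(word):
--     s = word.lower()
--     if not s: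
--         return 0
--     b = 10 + max(map(ord, s)) - 96
--     acc = 0
--     for c in s:
--         acc = acc * b + (ord(c) - 87)
--     return acc
-- ===== Notes on version B (the rewrite author's own statement) =====
-- stated objective: faster
-- what changed: Replaces the per-term b**(n-i-1) power computation in the positional sum by a single-pass Horner multiply-accumulate (and a builtin max over one lowered string instead of index loops).
import Mathlib
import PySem

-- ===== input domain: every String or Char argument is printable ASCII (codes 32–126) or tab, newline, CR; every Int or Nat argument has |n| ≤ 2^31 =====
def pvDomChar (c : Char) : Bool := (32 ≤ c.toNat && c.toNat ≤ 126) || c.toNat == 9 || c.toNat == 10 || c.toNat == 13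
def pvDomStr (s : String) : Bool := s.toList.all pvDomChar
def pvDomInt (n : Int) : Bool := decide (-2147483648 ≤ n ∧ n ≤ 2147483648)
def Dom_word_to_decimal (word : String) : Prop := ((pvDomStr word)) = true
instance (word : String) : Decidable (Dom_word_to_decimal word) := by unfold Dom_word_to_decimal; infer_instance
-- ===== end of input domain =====

-- B replaces A's per-term b**(n-i-1) positional sum with a one-pass Horner multiply-accumulate (faster).

-- ===== PORT A =====
def word_to_decimal (word : String) : Int :=
  let l := word.toList.map (fun c => PySem.Chars.lowerChar c)
  let a := l.foldl (fun a c => if ((c.toNat : Int)) > a then ((c.toNat : Int)) else a) 0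
  let b : Int := 10 + a - 96
  (PySem.List.pyRange 0 (l.length : Int) 1).foldl
    (fun myans i =>
      myans + (((PySem.List.pyGetD l i ' ').toNat : Int) - 97 + 10) * b ^ (((l.length : Int)) - i - 1).toNat)
    0

-- ===== PORT B =====
def word_to_decimal_alt (word : String) : Int :=
  let s := PySem.Chars.lower word.toList
  if s.isEmpty then 0
  else
    let b : Int := 10 + (PySem.List.max? (s.map (fun c => (c.toNat : Int))) id).getD 0 - 96
    s.foldl (fun acc c => acc * b + ((c.toNat : Int) - 87)) 0

-- ===== PRECONDITION & SPEC =====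
def Spec_word_to_decimal (word : String) (out : Int) : Prop := out = word_to_decimal_alt word
instance (word : String) (out : Int) : Decidable (Spec_word_to_decimal word out) := by unfold Spec_word_to_decimal; infer_instance

-- ===== CLAIM (what is proved, stated in full; the proofs are below) =====
def Claim_equal_word_to_decimal : Prop := ∀ (word : String), Dom_word_to_decimal word → Spec_word_to_decimal word (word_to_decimal word)

-- ===== LEMMAS AND PROOFS =====

/-- positional value of a digit list in base `b` (most significant first) -/
def pvWsum : List Int → Int → Int
  | [], _ => 0
  | d :: ds, b => d * b ^ ds.length + pvWsum ds b

lemma pv_horner (l : List Char) (b acc : Int) :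
    l.foldl (fun a c => a * b + ((c.toNat : Int) - 87)) acc
      = acc * b ^ l.length + pvWsum (l.map fun c => (c.toNat : Int) - 87) b := by
  induction l generalizing acc with
  | nil => simp [pvWsum]
  | cons x xs ih =>
    simp only [List.foldl_cons, ih, List.map_cons, pvWsum, List.length_cons, List.length_map]
    ring

lemma pv_sumA (l : List Char) (b : Int) :
    ((List.range l.length).map
        (fun k => ((((l.getD k ' ').toNat : Int)) - 97 + 10) * b ^ (((l.length : Int)) - (k : Int) - 1).toNat)).sum
      = pvWsum (l.map fun c => (c.toNat : Int) - 87) b := by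
  induction l with
  | nil => simp [pvWsum]
  | cons x xs ih =>
    rw [List.length_cons, List.range_succ_eq_map, List.map_cons, List.map_map, List.sum_cons]
    have e : ∀ (n k : Int), n + 1 - (k + 1) - 1 = n - k - 1 := fun n k => by ring
    simp only [Function.comp_def, List.getD_cons_succ, List.getD_cons_zero,
      Nat.cast_succ, Nat.cast_zero, e]
    rw [ih]
    simp only [List.map_cons, pvWsum, List.length_map]
    have h1 : (((xs.length : Int)) + 1 - 0 - 1).toNat = xs.length := by omega
    rw [h1]
    ring

lemma pv_max_cons (key : Int → Int) (x : Int) (t : List Int) :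
    PySem.List.max? (x :: t) key = some (t.foldl (fun m y => if key m < key y then y else m) x) := by
  induction t generalizing x with
  | nil => rfl
  | cons y s ih =>
    have h : PySem.List.max? (x :: y :: s) key
        = PySem.List.max? ((if key x < key y then y else x) :: s) key := by
      by_cases hc : key x < key y <;> simp [PySem.List.max?, hc]
    rw [h, ih, List.foldl_cons]

lemma pv_max_eq (x : Int) (t : List Int) (hx : 0 ≤ x) :
    PySem.List.max? (x :: t) id = some ((x :: t).foldl (fun a y => if y > a then y else a) 0) := by
  rw [pv_max_cons]
  have h0 : (if x > (0 : Int) then x else (0 : Int)) = x := by split_ifs <;> omega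
  simp only [id_eq, gt_iff_lt, List.foldl_cons, h0]
  rfl

lemma pv_A_sum (l : List Char) (b : Int) :
    (PySem.List.pyRange 0 (l.length : Int) 1).foldl
        (fun myans i =>
          myans + (((PySem.List.pyGetD l i ' ').toNat : Int) - 97 + 10) * b ^ (((l.length : Int)) - i - 1).toNat)
        0
      = pvWsum (l.map fun c => (c.toNat : Int) - 87) b := by
  rw [PySem.List.foldl_add, PySem.List.pyRange_one]
  simp only [List.map_map, Function.comp_def, zero_add, Int.sub_zero, Int.toNat_natCast,
    PySem.List.pyGetD_natCast]
  exact pv_sumA l b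

-- ===== VERDICT (by name: the statement is the Claim_ definition above) =====
theorem word_to_decimal_spec : Claim_equal_word_to_decimal := by
  intro word _
  unfold Spec_word_to_decimal
  simp only [word_to_decimal, word_to_decimal_alt, PySem.Chars.lower]
  generalize List.map PySem.Chars.lowerChar word.toList = l
  cases l with
  | nil => simp [PySem.List.pyRange]
  | cons c t =>
    rw [pv_A_sum]
    have hmax : (PySem.List.max? ((c :: t).map (fun c => (c.toNat : Int))) id).getD 0
        = (c :: t).foldl (fun a c => if ((c.toNat : Int)) > a then ((c.toNat : Int)) else a) 0 := by
      simp only [List.map_cons]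
      rw [pv_max_eq _ _ (Int.natCast_nonneg _)]
      simp [List.foldl_map]
    simp only [List.isEmpty_cons, Bool.false_eq_true, if_false]
    rw [hmax, pv_horner]
    simp
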